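-- pv_equiv track=rewrite | github.com/alejandro-romero/PhD-Experiments | 2018_HAIS/HAIS2018/DistancesCertainty.py | getMinDistancesMap
-- ===== SOURCE A (Python) =====
-- def getMinDistancesMap(T):
--     """Return the set of the minimum distances for all the points in T.
--      T is the set of trace points (episodes) used to define the certainty map."""
--     D = [[None] * len(T) for i in range(len(T[0]))]
--     N_GR = 99999
--     for k in range(len(T)):
--         for i in range(len(T[0])):
--             d_pos = N_GR
--             d_neg = d_pos
--             for j in range(len(T)):
--                 if k != j:
--                     d = T[k][i] - T[j][i]
--                     if d > 0:
--                         d_pos = min(d_pos, d)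
--                     else:
--                         d_neg = min(d_neg, -d)
--
--             if d_pos > N_GR / 2:
--                 d_pos = -1
--
--             if d_neg > N_GR / 2:
--                 d_neg = -1
--
--             D[i][k] = max(d_pos, d_neg)
--
--     return D
-- ===== SOURCE B (Python) =====
-- def _fin(g):
--     # A gap survives only if it is at most 49999 (A's N_GR sentinel rule); otherwise -1.
--     return g if g is not None and g <= 49999 else -1
--
--
-- def getMinDistancesMap(T):
--     """Return the set of the minimum distances for all the points in T.
--      T is the set of trace points (episodes) used to define the certainty map."""
--     m = len(T[0])
--     D = []
--     for i in range(m):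
--         col = [row[i] for row in T]
--         cnt = {}
--         for v in col:
--             cnt[v] = cnt.get(v, 0) + 1
--         vs = sorted(cnt)
--         res = {}
--         for p, v in enumerate(vs):
--             pos = v - vs[p - 1] if p > 0 else None
--             if cnt[v] > 1:
--                 neg = 0
--             else:
--                 neg = vs[p + 1] - v if p + 1 < len(vs) else None
--             res[v] = max(_fin(pos), _fin(neg))
--         D.append([res[v] for v in col])
--     return D
-- ===== Notes on version B (the rewrite author's own statement) =====
-- stated objective: faster
-- what changed: Replaces A's all-pairs inner scan per (point, dimension) cell by a per-column pass that counts values, sorts the distinct values once, and reads each point's nearest-smaller and nearest-greater-or-equal gap off the adjacent sorted entries (with the same <=49999 sentinel cutoff).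
-- outside the precondition, e.g. on getMinDistancesMap([]): A raises IndexError, B raises IndexError; on getMinDistancesMap([[1, 2], [3]]): A raises IndexError, B raises IndexError
import Mathlib
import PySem

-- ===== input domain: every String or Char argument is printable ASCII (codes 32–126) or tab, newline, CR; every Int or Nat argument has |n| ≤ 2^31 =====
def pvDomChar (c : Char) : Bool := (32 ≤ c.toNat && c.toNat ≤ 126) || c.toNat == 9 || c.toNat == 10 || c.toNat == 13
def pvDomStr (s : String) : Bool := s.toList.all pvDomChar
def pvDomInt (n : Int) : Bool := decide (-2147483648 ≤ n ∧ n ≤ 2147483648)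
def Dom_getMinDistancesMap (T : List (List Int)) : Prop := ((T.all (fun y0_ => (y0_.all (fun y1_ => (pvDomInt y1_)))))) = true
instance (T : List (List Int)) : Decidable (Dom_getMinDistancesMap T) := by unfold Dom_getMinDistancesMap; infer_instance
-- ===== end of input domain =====

-- B replaces A's per-dimension all-pairs scan by a per-column table of sorted distinct values
-- with their counts, reading each point's nearest-smaller / nearest-greater-or-equal gap off
-- the adjacent sorted entries (objective: faster, O(d·n log n) vs O(d·n²)).

-- ===== PORT A =====
-- inner j-loop of A for the cell (k, i): running (d_pos, d_neg) minima over all j ≠ k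
def pvInnerA (T : List (List Int)) (k i : Int) : Int × Int :=
  (PySem.List.pyRange 0 (T.length : Int) 1).foldl
    (fun dd j =>
      if k ≠ j then
        let d := PySem.List.pyGetD (PySem.List.pyGetD T k []) i 0
                 - PySem.List.pyGetD (PySem.List.pyGetD T j []) i 0
        if d > 0 then (min dd.1 d, dd.2) else (dd.1, min dd.2 (-d))
      else dd)
    (99999, 99999)

-- A fills the cell D[i][k] exactly once, so D is built here column-major, matching D's layout;
-- the comparison 'd_pos > 99999 / 2' (float 49999.5) is exact for ints as '2*d_pos > 99999'.
def getMinDistancesMap (T : List (List Int)) : List (List Int) :=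
  (PySem.List.pyRange 0 ((PySem.List.pyGetD T 0 []).length : Int) 1).map (fun i =>
    (PySem.List.pyRange 0 (T.length : Int) 1).map (fun k =>
      let dd := pvInnerA T k i
      let dp := if 2 * dd.1 > 99999 then -1 else dd.1
      let dn := if 2 * dd.2 > 99999 then -1 else dd.2
      max dp dn))

-- ===== PORT B =====
def pvFin (g : Option Int) : Int :=
  match g with
  | some x => if x ≤ 49999 then x else -1
  | none => -1

-- port of Source B: per column build value counts, sort the distinct values, read each value's
-- answer from its sorted neighbours ('res[v]' is exact as getD: every column value is a key)
def getMinDistancesMap_alt (T : List (List Int)) : List (List Int) :=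
  let m := ((PySem.List.pyGetD T 0 []).length : Int)
  (PySem.List.pyRange 0 m 1).map (fun i =>
    let col := T.map (fun row => PySem.List.pyGetD row i 0)
    let cnt := col.foldl (fun (d : PySem.Dict Int Int) v => d.insert v (d.getD v 0 + 1)) PySem.Dict.empty
    let vs := PySem.List.sorted cnt.keys (fun x => x) false
    let res := (PySem.List.enumerate vs 0).foldl
      (fun (d : PySem.Dict Int Int) pv =>
        let p := pv.1
        let v := pv.2
        let pos : Option Int := if p > 0 then some (v - PySem.List.pyGetD vs (p - 1) 0) else none
        let neg : Option Int :=
          if cnt.getD v 0 > 1 then some 0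
          else if p + 1 < (vs.length : Int) then some (PySem.List.pyGetD vs (p + 1) 0 - v) else none
        d.insert v (max (pvFin pos) (pvFin neg)))
      PySem.Dict.empty
    col.map (fun v => res.getD v 0))

-- ===== PRECONDITION & SPEC =====
-- Pre_ excludes exactly the inputs where Python A raises IndexError: empty T (T[0]) and rows
-- shorter than row 0 (T[j][i] is read for every i < len(T[0])).
def Pre_getMinDistancesMap (T : List (List Int)) : Prop :=
  T ≠ [] ∧ ∀ row ∈ T, T.headI.length ≤ row.length
instance (T : List (List Int)) : Decidable (Pre_getMinDistancesMap T) := by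
  unfold Pre_getMinDistancesMap; infer_instance

def pvWitness_getMinDistancesMap : List (List Int) := [[0, 2], [5, 2], [7, 9]]

def Spec_getMinDistancesMap (T : List (List Int)) (out : List (List Int)) : Prop := out = getMinDistancesMap_alt T
instance (T : List (List Int)) (out : List (List Int)) : Decidable (Spec_getMinDistancesMap T out) := by unfold Spec_getMinDistancesMap; infer_instance

-- ===== CLAIM (what is proved, stated in full; the proofs are below) =====
def Claim_equal_getMinDistancesMap : Prop := ∀ (T : List (List Int)), Dom_getMinDistancesMap T → Pre_getMinDistancesMap T → Spec_getMinDistancesMap T (getMinDistancesMap T)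

-- ===== LEMMAS AND PROOFS =====

-- the minima A's inner loop computes, as folded min over the positive / non-positive gap lists
def pvMinP (v : Int) (l : List Int) : Int :=
  ((l.filter (fun w => decide (v - w > 0))).map (fun w => v - w)).foldl min 99999

def pvMinN (v : Int) (l : List Int) : Int :=
  ((l.filter (fun w => !decide (v - w > 0))).map (fun w => -(v - w))).foldl min 99999

-- B's sorted distinct column values
def pvVs (col : List Int) : List Int :=
  PySem.List.sorted (PySem.Set.ofList col) (fun x => x) false

theorem pvFoldlMin_le_init (l : List Int) (a : Int) : l.foldl min a ≤ a := by
  induction l generalizing a with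
  | nil => simp
  | cons x t ih => exact le_trans (ih (min a x)) (min_le_left _ _)

theorem pvFoldlMin_le_mem (l : List Int) (a x : Int) (h : x ∈ l) : l.foldl min a ≤ x := by
  induction l generalizing a with
  | nil => simp at h
  | cons y t ih =>
    rcases List.mem_cons.mp h with h | h
    · subst h
      exact le_trans (pvFoldlMin_le_init t (min a x)) (min_le_right _ _)
    · exact ih (min a y) h

theorem pvLe_foldlMin (l : List Int) (a c : Int) (h1 : c ≤ a) (h2 : ∀ x ∈ l, c ≤ x) :
    c ≤ l.foldl min a := by
  induction l generalizing a with
  | nil => simpa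
  | cons y t ih =>
    exact ih (min a y) (le_min h1 (h2 y List.mem_cons_self))
      (fun x hx => h2 x (List.mem_cons_of_mem _ hx))

theorem pvPairSplit (v : Int) (l : List Int) (a b : Int) :
    l.foldl (fun dd w => if v - w > 0 then (min dd.1 (v - w), dd.2) else (dd.1, min dd.2 (-(v - w)))) (a, b)
    = (l.foldl (fun x w => if v - w > 0 then min x (v - w) else x) a,
       l.foldl (fun x w => if v - w > 0 then x else min x (-(v - w))) b) := by
  induction l generalizing a b with
  | nil => rfl
  | cons w t ih => simp only [List.foldl_cons]; split <;> exact ih _ _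

-- fold with a guarded min IS the fold over the filtered, mapped gap list (positive branch)
theorem pvFoldP_eq (v : Int) (l : List Int) (a : Int) :
    l.foldl (fun x w => if v - w > 0 then min x (v - w) else x) a
    = ((l.filter (fun w => decide (v - w > 0))).map (fun w => v - w)).foldl min a := by
  induction l generalizing a with
  | nil => rfl
  | cons w t ih =>
    simp only [List.foldl_cons, List.filter_cons]
    by_cases h : v - w > 0
    · rw [if_pos h, if_pos (by simpa using h)]
      simp only [List.map_cons, List.foldl_cons]
      exact ih _
    · rw [if_neg h, if_neg (by simpa using h)]
      exact ih _

theorem pvFoldN_eq (v : Int) (l : List Int) (a : Int) :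
    l.foldl (fun x w => if v - w > 0 then x else min x (-(v - w))) a
    = ((l.filter (fun w => !decide (v - w > 0))).map (fun w => -(v - w))).foldl min a := by
  induction l generalizing a with
  | nil => rfl
  | cons w t ih =>
    simp only [List.foldl_cons, List.filter_cons]
    by_cases h : v - w > 0
    · rw [if_pos h, if_neg (by simpa using h)]
      exact ih _
    · rw [if_neg h, if_pos (by simpa using h)]
      simp only [List.map_cons, List.foldl_cons]
      exact ih _

theorem pvSkipFold {α : Type} (col : List Int) (k : Nat) (hk : k < col.length)
    (f : α → Int → α) (init : α) :
    (PySem.List.pyRange 0 (col.length : Int) 1).foldl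
      (fun acc j => if (k : Int) ≠ j then f acc (PySem.List.pyGetD col j 0) else acc) init
    = (col.take k ++ col.drop (k+1)).foldl f init := by
  rw [PySem.List.pyRange_one_append 0 (k : Int) (col.length : Int) (by positivity) (by exact_mod_cast hk.le),
      PySem.List.pyRange_one_cons (a := (k : Int)) (b := (col.length : Int)) (by exact_mod_cast hk)]
  rw [List.foldl_append, List.foldl_cons]
  simp only [ne_eq, not_true_eq_false, if_false, List.foldl_append]
  have h1 : ∀ (init : α), (PySem.List.pyRange 0 (k : Int) 1).foldl
      (fun acc j => if (k : Int) ≠ j then f acc (PySem.List.pyGetD col j 0) else acc) init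
      = (col.take k).foldl f init := by
    intro init
    rw [PySem.List.foldl_congr_mem _ _
        (fun acc j => f acc (PySem.List.pyGetD (col.take k) j 0)) init ?_]
    · have hlen : ((col.take k).length : Int) = (k : Int) := by
        simp [List.length_take]; omega
      rw [← hlen, PySem.List.foldl_pyRange_zero_pyGetD']
    · intro acc j hj
      rw [PySem.List.mem_pyRange_one] at hj
      rw [if_pos (by omega)]
      congr 1
      rw [PySem.List.pyGetD_eq_getElem _ _ hj.1 (by exact_mod_cast lt_of_lt_of_le hj.2 (by exact_mod_cast hk.le)),
          PySem.List.pyGetD_eq_getElem _ _ hj.1 (by simp [List.length_take]; omega)]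
      rw [List.getElem_take]
  have h2 : ∀ (init : α), (PySem.List.pyRange ((k : Int) + 1) (col.length : Int) 1).foldl
      (fun acc j => if (k : Int) ≠ j then f acc (PySem.List.pyGetD col j 0) else acc) init
      = (col.drop (k+1)).foldl f init := by
    intro init
    rw [PySem.List.foldl_congr_mem _ _
        (fun acc j => f acc (PySem.List.pyGetD col j 0)) init ?_]
    · have := PySem.List.foldl_pyRange_pyGetD' col 0 f init (a := (k : Int) + 1) (by positivity)
      rw [this]
      have ht : ((k : Int) + 1).toNat = k + 1 := by omega
      rw [ht]
    · intro acc j hj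
      rw [PySem.List.mem_pyRange_one] at hj
      rw [if_pos (by omega)]
  rw [h1, h2]

theorem pvInnerA_char (T : List (List Int)) (i : Int) (k : Nat) (col : List Int) (v : Int)
    (hcol : col = T.map (fun row => PySem.List.pyGetD row i 0))
    (hk : k < T.length)
    (hv : v = col[k]'(by rw [hcol]; simpa using hk)) :
    pvInnerA T (k : Int) i
    = (pvMinP v col, pvMinN v (col.take k ++ col.drop (k+1))) := by
  subst hcol
  have hkc : k < (T.map (fun row => PySem.List.pyGetD row i 0)).length := by simpa using hk
  have hgetk : PySem.List.pyGetD (PySem.List.pyGetD T (k : Int) []) i 0 = v := by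
    rw [PySem.List.pyGetD_eq_getElem T [] (Int.natCast_nonneg k) (by exact_mod_cast hk)]
    rw [hv]
    simp
  have hgetj : ∀ j : Int, 0 ≤ j → j < (T.length : Int) →
      PySem.List.pyGetD (PySem.List.pyGetD T j []) i 0
      = PySem.List.pyGetD (T.map (fun row => PySem.List.pyGetD row i 0)) j 0 := by
    intro j h0 h1
    rw [PySem.List.pyGetD_eq_getElem T [] h0 h1,
        PySem.List.pyGetD_eq_getElem _ 0 h0 (by simpa using h1)]
    simp
  unfold pvInnerA
  rw [PySem.List.foldl_congr_mem _ _
      (fun dd j => if (k : Int) ≠ j then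
          (if v - PySem.List.pyGetD (T.map (fun row => PySem.List.pyGetD row i 0)) j 0 > 0
           then (min dd.1 (v - PySem.List.pyGetD (T.map (fun row => PySem.List.pyGetD row i 0)) j 0), dd.2)
           else (dd.1, min dd.2 (-(v - PySem.List.pyGetD (T.map (fun row => PySem.List.pyGetD row i 0)) j 0))))
        else dd) _ ?_]
  · have hlenT : ((T.map (fun row => PySem.List.pyGetD row i 0)).length : Int) = (T.length : Int) := by simp
    rw [← hlenT]
    rw [pvSkipFold (T.map (fun row => PySem.List.pyGetD row i 0)) k hkc
        (fun dd w => if v - w > 0 then (min dd.1 (v - w), dd.2) else (dd.1, min dd.2 (-(v - w)))) (99999, 99999)]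
    rw [pvPairSplit]
    have hfp := pvFoldP_eq v ((T.map (fun row => PySem.List.pyGetD row i 0)).take k
        ++ (T.map (fun row => PySem.List.pyGetD row i 0)).drop (k+1)) 99999
    have hfn := pvFoldN_eq v ((T.map (fun row => PySem.List.pyGetD row i 0)).take k
        ++ (T.map (fun row => PySem.List.pyGetD row i 0)).drop (k+1)) 99999
    rw [hfp, hfn]
    unfold pvMinP pvMinN
    rw [Prod.mk.injEq]
    refine ⟨?_, rfl⟩
    -- the skipped element equals v, which never contributes a positive gap
    have hsplit : T.map (fun row => PySem.List.pyGetD row i 0)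
        = (T.map (fun row => PySem.List.pyGetD row i 0)).take k
          ++ v :: (T.map (fun row => PySem.List.pyGetD row i 0)).drop (k+1) := by
      conv_lhs => rw [← List.take_append_drop k (T.map (fun row => PySem.List.pyGetD row i 0))]
      rw [List.drop_eq_getElem_cons hkc, ← hv]
    have hfe : (T.map (fun row => PySem.List.pyGetD row i 0)).filter (fun w => decide (v - w > 0))
        = ((T.map (fun row => PySem.List.pyGetD row i 0)).take k
           ++ (T.map (fun row => PySem.List.pyGetD row i 0)).drop (k+1)).filter (fun w => decide (v - w > 0)) := by
      conv_lhs => rw [hsplit]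
      simp [List.filter_append]
    rw [hfe]
  · intro dd j hj
    rw [PySem.List.mem_pyRange_one] at hj
    by_cases hkj : (k : Int) ≠ j
    · simp only [if_pos hkj]
      simp only [hgetk, hgetj j hj.1 hj.2]
    · simp only [if_neg hkj]

theorem pvRes_getD {ν : Type} (vs : List Int) (hnd : vs.Nodup) (valf : Int × Int → ν)
    (p : Nat) (hp : p < vs.length) (d0 : ν) :
    ((PySem.List.enumerate vs 0).foldl (fun d pv => d.insert pv.2 (valf pv)) PySem.Dict.empty).getD
      (vs[p]) d0 = valf ((p : Int), vs[p]) := by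
  have hitems := PySem.Dict.items_foldl_insert_fresh (PySem.List.enumerate vs 0)
    (fun pv => pv.2) (fun pv => valf pv) PySem.Dict.empty
    (by intro a _; simp [PySem.Dict.contains_empty])
    (by rw [PySem.List.map_snd_enumerate]; exact hnd)
  have hkeys : ((PySem.List.enumerate vs 0).foldl (fun d pv => d.insert pv.2 (valf pv)) PySem.Dict.empty).keys = vs := by
    show (((PySem.List.enumerate vs 0).foldl (fun d pv => d.insert pv.2 (valf pv)) PySem.Dict.empty).items.map (·.1)) = vs
    rw [hitems]
    simp only [PySem.Dict.empty, List.nil_append]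
    rw [List.map_map]
    exact PySem.List.map_snd_enumerate vs 0
  apply PySem.Dict.getD_of_mem_items
  · rw [hitems]
    simp only [List.mem_append, List.mem_map]
    right
    refine ⟨((p : Int), vs[p]), ?_, rfl⟩
    rw [PySem.List.mem_enumerate_iff]
    exact ⟨p, hp, by simp⟩
  · rw [hkeys]; exact hnd

theorem pvVs_pairwise (col : List Int) : (pvVs col).Pairwise (· < ·) :=
  PySem.List.sorted_ofList_pairwise_lt col

theorem pvVs_nodup (col : List Int) : (pvVs col).Nodup :=
  (pvVs_pairwise col).imp ne_of_lt

theorem pvVs_mem (col : List Int) (x : Int) : x ∈ pvVs col ↔ x ∈ col := by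
  unfold pvVs
  rw [PySem.List.mem_sorted]
  exact PySem.Set.mem_ofList col x

theorem pvVs_mono (col : List Int) (q r : Nat) (hqr : q < r) (hr : r < (pvVs col).length) :
    (pvVs col)[q]'(by omega) < (pvVs col)[r] :=
  List.pairwise_iff_getElem.mp (pvVs_pairwise col) q r (by omega) hr hqr

theorem pvVs_mono_le (col : List Int) (q r : Nat) (hqr : q ≤ r) (hr : r < (pvVs col).length) :
    (pvVs col)[q]'(by omega) ≤ (pvVs col)[r] := by
  rcases Nat.eq_or_lt_of_le hqr with heq | hlt
  · subst heq; exact le_refl _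
  · exact le_of_lt (pvVs_mono col q r hlt hr)

theorem pvVs_lt_index (col : List Int) (q r : Nat) (hq : q < (pvVs col).length)
    (hr : r < (pvVs col).length) (h : (pvVs col)[q] < (pvVs col)[r]) : q < r := by
  by_contra hc
  rcases Nat.lt_or_ge r q with h' | h'
  · exact absurd (pvVs_mono col r q h' hq) (by omega)
  · have : q = r := by omega
    subst this; omega

theorem pvVs_index_of_mem (col : List Int) (w : Int) (h : w ∈ col) :
    ∃ q, ∃ (hq : q < (pvVs col).length), (pvVs col)[q] = w := by
  have := (pvVs_mem col w).mpr h
  rcases List.mem_iff_getElem.mp this with ⟨q, hq, he⟩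
  exact ⟨q, hq, he⟩

-- positive side: A's capped nearest-smaller gap equals B's predecessor reading
theorem pvPosCell (col : List Int) (v : Int) (p : Nat) (hp : p < (pvVs col).length)
    (hpv : (pvVs col)[p] = v) :
    (if 2 * pvMinP v col > 99999 then -1 else pvMinP v col)
    = pvFin (if ((p : Int) > 0) then some (v - PySem.List.pyGetD (pvVs col) ((p : Int) - 1) 0) else none) := by
  by_cases hp0 : p = 0
  · subst hp0
    rw [if_neg (show ¬(((0:Nat):Int) > 0) by norm_num)]
    have hfil : col.filter (fun w => decide (v - w > 0)) = [] := by
      rw [List.filter_eq_nil_iff]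
      intro w hw
      rcases pvVs_index_of_mem col w hw with ⟨q, hq, he⟩
      simp only [decide_eq_true_eq]
      intro hlt
      have : (pvVs col)[q] < (pvVs col)[0] := by rw [he, hpv]; omega
      exact absurd (pvVs_lt_index col q 0 hq hp this) (by omega)
    have : pvMinP v col = 99999 := by unfold pvMinP; rw [hfil]; rfl
    rw [this, if_pos (by omega)]
    rfl
  · have hp0' : 0 < p := Nat.pos_of_ne_zero hp0
    rw [if_pos (show ((p:Int) > 0) by exact_mod_cast hp0')]
    have hup : p - 1 < (pvVs col).length := by omega
    have hg : PySem.List.pyGetD (pvVs col) ((p : Int) - 1) 0 = (pvVs col)[p-1] := by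
      rw [PySem.List.pyGetD_eq_getElem _ _ (by omega) (by omega)]
      have hidx : ((p : Int) - 1).toNat = p - 1 := by omega
      simp only [hidx]
    rw [hg]
    set u := (pvVs col)[p-1]'hup with hu
    have hult : u < v := by rw [hu, ← hpv]; exact pvVs_mono col (p-1) p (by omega) hp
    have humem : u ∈ col := (pvVs_mem col u).mp (by rw [hu]; exact List.getElem_mem _)
    have hM : pvMinP v col = min 99999 (v - u) := by
      unfold pvMinP
      apply le_antisymm
      · apply le_min (pvFoldlMin_le_init _ _)
        apply pvFoldlMin_le_mem
        rw [List.mem_map]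
        exact ⟨u, List.mem_filter.mpr ⟨humem, by simp; omega⟩, rfl⟩
      · apply pvLe_foldlMin _ _ _ (min_le_left _ _)
        intro x hx
        rcases List.mem_map.mp hx with ⟨w, hwf, hwx⟩
        rcases List.mem_filter.mp hwf with ⟨hwm, hwp⟩
        simp only [decide_eq_true_eq] at hwp
        rcases pvVs_index_of_mem col w hwm with ⟨q, hq, he⟩
        have hqp : q < p := pvVs_lt_index col q p hq hp (by rw [he, hpv]; omega)
        have hwu : w ≤ u := by
          rw [← he, hu]
          exact pvVs_mono_le col q (p-1) (by omega) hup
        omega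
    rw [hM]
    simp only [pvFin]
    split_ifs <;> omega

-- negative side: A's capped nearest-greater-or-equal gap (over the column without index k)
-- equals B's duplicate-count / successor reading
theorem pvNegCell (col : List Int) (k : Nat) (hk : k < col.length) (p : Nat)
    (hp : p < (pvVs col).length) (hpv : (pvVs col)[p] = col[k]) :
    (if 2 * pvMinN (col[k]) (col.take k ++ col.drop (k+1)) > 99999 then -1
     else pvMinN (col[k]) (col.take k ++ col.drop (k+1)))
    = pvFin (if ((List.count (col[k]) col : Int) > 1) then some 0
             else if ((p : Int) + 1 < ((pvVs col).length : Int))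
                  then some (PySem.List.pyGetD (pvVs col) ((p : Int) + 1) 0 - col[k]) else none) := by
  set v := col[k]'hk with hv
  set rest := col.take k ++ col.drop (k+1) with hrest
  have hsplit : col = col.take k ++ v :: col.drop (k+1) := by
    conv_lhs => rw [← List.take_append_drop k col]
    rw [List.drop_eq_getElem_cons hk]
  have hcount : List.count v col = List.count v rest + 1 := by
    conv_lhs => rw [hsplit]
    rw [hrest, List.count_append, List.count_append, List.count_cons_self]
    omega
  have hmemrest : ∀ w ∈ rest, w ∈ col := by
    intro w hw
    rw [hsplit]
    rcases List.mem_append.mp hw with h | h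
    · exact List.mem_append.mpr (Or.inl h)
    · exact List.mem_append.mpr (Or.inr (List.mem_cons_of_mem _ h))
  by_cases hdup : (1 : Int) < (List.count v col : Int)
  · rw [if_pos hdup]
    have hvrest : v ∈ rest := by
      have : 0 < List.count v rest := by omega
      exact List.count_pos_iff.mp this
    have hM : pvMinN v rest = 0 := by
      unfold pvMinN
      apply le_antisymm
      · apply pvFoldlMin_le_mem
        rw [List.mem_map]
        exact ⟨v, List.mem_filter.mpr ⟨hvrest, by simp⟩, by simp⟩
      · apply pvLe_foldlMin _ _ _ (by omega)
        intro x hx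
        rcases List.mem_map.mp hx with ⟨w, hwf, hwx⟩
        rcases List.mem_filter.mp hwf with ⟨_, hwp⟩
        simp only [Bool.not_eq_eq_eq_not, Bool.not_true, decide_eq_false_iff_not] at hwp
        omega
    rw [hM, if_neg (by omega)]
    rfl
  · rw [if_neg hdup]
    have hvcol : v ∈ col := by rw [hv]; exact List.getElem_mem _
    have hcnt1 : List.count v col = 1 := by
      have := List.count_pos_iff.mpr hvcol
      omega
    have hvnotrest : v ∉ rest := by
      rw [← List.count_eq_zero]
      omega
    by_cases hnext : (p : Int) + 1 < ((pvVs col).length : Int)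
    · rw [if_pos hnext]
      have hpn : p + 1 < (pvVs col).length := by omega
      have hg : PySem.List.pyGetD (pvVs col) ((p : Int) + 1) 0 = (pvVs col)[p+1] := by
        rw [PySem.List.pyGetD_eq_getElem _ _ (by omega) (by omega)]
        have hidx : ((p : Int) + 1).toNat = p + 1 := by omega
        simp only [hidx]
      rw [hg]
      set u := (pvVs col)[p+1]'hpn with hu
      have hult : v < u := by rw [hu, ← hpv]; exact pvVs_mono col p (p+1) (by omega) hpn
      have humem : u ∈ col := (pvVs_mem col u).mp (by rw [hu]; exact List.getElem_mem _)
      have hurest : u ∈ rest := by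
        have hcnt : List.count u rest = List.count u col := by
          conv_rhs => rw [hsplit]
          rw [hrest, List.count_append, List.count_append, List.count_cons_of_ne (by omega)]
        have : 0 < List.count u col := List.count_pos_iff.mpr humem
        exact List.count_pos_iff.mp (by omega)
      have hM : pvMinN v rest = min 99999 (u - v) := by
        unfold pvMinN
        apply le_antisymm
        · apply le_min (pvFoldlMin_le_init _ _)
          have : -(v - u) = u - v := by ring
          rw [← this]
          apply pvFoldlMin_le_mem
          rw [List.mem_map]
          exact ⟨u, List.mem_filter.mpr ⟨hurest, by simp; omega⟩, rfl⟩
        · apply pvLe_foldlMin _ _ _ (min_le_left _ _)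
          intro x hx
          rcases List.mem_map.mp hx with ⟨w, hwf, hwx⟩
          rcases List.mem_filter.mp hwf with ⟨hwm, hwp⟩
          simp only [Bool.not_eq_eq_eq_not, Bool.not_true, decide_eq_false_iff_not] at hwp
          have hwv : w ≠ v := fun h => hvnotrest (h ▸ hwm)
          have hwgt : v < w := by omega
          rcases pvVs_index_of_mem col w (hmemrest w hwm) with ⟨q, hq, he⟩
          have hqp : p < q := pvVs_lt_index col p q hp hq (by rw [he, hpv]; omega)
          have hwu : u ≤ w := by
            rw [← he, hu]
            exact pvVs_mono_le col (p+1) q (by omega) hq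
          omega
      rw [hM]
      simp only [pvFin]
      split_ifs <;> omega
    · rw [if_neg hnext]
      have hfil : rest.filter (fun w => !decide (v - w > 0)) = [] := by
        rw [List.filter_eq_nil_iff]
        intro w hw
        simp only [Bool.not_eq_eq_eq_not, Bool.not_true, decide_eq_false_iff_not]
        intro hge
        have hwv : w ≠ v := fun h => hvnotrest (h ▸ hw)
        have hwgt : v < w := by omega
        rcases pvVs_index_of_mem col w (hmemrest w hw) with ⟨q, hq, he⟩
        have hqp : p < q := pvVs_lt_index col p q hp hq (by rw [he, hpv]; omega)
        push_cast at hnext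
        omega
      have : pvMinN v rest = 99999 := by unfold pvMinN; rw [hfil]; rfl
      rw [this, if_pos (by omega)]
      rfl

-- B's per-column dictionary, looked up at col[k], yields the sorted-neighbour reading at
-- the index p of col[k] in the sorted distinct values
theorem pvBside (col : List Int) (k : Nat) (hkc : k < col.length) (p : Nat)
    (hp : p < (pvVs col).length) (hpv : (pvVs col)[p] = col[k]) :
    ((PySem.List.enumerate (PySem.List.sorted (PySem.Set.ofList col) (fun x => x) false) 0).foldl
      (fun d pv => d.insert pv.2 (max
         (pvFin (if pv.1 > 0 then some (pv.2 - PySem.List.pyGetD (PySem.List.sorted (PySem.Set.ofList col) (fun x => x) false) (pv.1 - 1) 0) else none))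
         (pvFin (if (PySem.Dict.counter col).getD pv.2 0 > 1 then some 0
                 else if pv.1 + 1 < ((PySem.List.sorted (PySem.Set.ofList col) (fun x => x) false).length : Int)
                      then some (PySem.List.pyGetD (PySem.List.sorted (PySem.Set.ofList col) (fun x => x) false) (pv.1 + 1) 0 - pv.2) else none))))
      PySem.Dict.empty).getD (col[k]) 0
    = max (pvFin (if ((p : Int) > 0) then some (col[k] - PySem.List.pyGetD (pvVs col) ((p : Int) - 1) 0) else none))
          (pvFin (if ((List.count (col[k]) col : Int) > 1) then some 0
                  else if ((p : Int) + 1 < ((pvVs col).length : Int))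
                       then some (PySem.List.pyGetD (pvVs col) ((p : Int) + 1) 0 - col[k]) else none)) := by
  have hvs : PySem.List.sorted (PySem.Set.ofList col) (fun x => x) false = pvVs col := rfl
  rw [hvs]
  conv_lhs => rw [← hpv]
  rw [pvRes_getD (pvVs col) (pvVs_nodup col) _ p hp 0]
  dsimp only []
  rw [PySem.Dict.getD_counter]
  rw [hpv]

-- ===== VERDICT (by name: the statement is the Claim_ definition above) =====
theorem getMinDistancesMap_spec : Claim_equal_getMinDistancesMap := by
  intro T _hDom _hPre
  unfold Spec_getMinDistancesMap getMinDistancesMap getMinDistancesMap_alt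
  dsimp only []
  apply List.map_congr_left
  intro i _hi
  rw [PySem.Dict.foldl_insert_getD_add_one_eq_counter]
  rw [PySem.Dict.keys_counter]
  apply List.ext_getElem
  · simp [PySem.List.length_pyRange_one]
  · intro k hk1 hk2
    have hkT : k < T.length := by
      simpa [PySem.List.length_pyRange_one] using hk1
    rw [List.getElem_map, List.getElem_map, PySem.List.getElem_pyRange_one, zero_add]
    have hkc : k < (T.map (fun row => PySem.List.pyGetD row i 0)).length := by simpa using hkT
    rcases pvVs_index_of_mem (T.map (fun row => PySem.List.pyGetD row i 0))
      ((T.map (fun row => PySem.List.pyGetD row i 0))[k]'hkc) (List.getElem_mem hkc) with ⟨p, hp, hpv⟩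
    rw [pvInnerA_char T i k (T.map (fun row => PySem.List.pyGetD row i 0))
        ((T.map (fun row => PySem.List.pyGetD row i 0))[k]'hkc) rfl hkT rfl]
    rw [pvBside (T.map (fun row => PySem.List.pyGetD row i 0)) k hkc p hp hpv]
    rw [pvPosCell (T.map (fun row => PySem.List.pyGetD row i 0))
        ((T.map (fun row => PySem.List.pyGetD row i 0))[k]'hkc) p hp hpv]
    rw [pvNegCell (T.map (fun row => PySem.List.pyGetD row i 0)) k hkc p hp hpv]
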